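-- pv_equiv track=rewrite | github.com/fgeorgea/mooc | module6/construction_dict_amis.py | construction_dict_amis
-- ===== SOURCE A (Python) =====
-- def	construction_dict_amis(amis):
-- 	friends = {}
-- 	for ami in amis:
-- 		if ami[0] not in friends:
-- 			friends[ami[0]] = set()
-- 			friends[ami[0]].add(ami[1])
-- 		if ami[0] in friends:
-- 			friends[ami[0]].add(ami[1])
-- 	for ami in amis:
-- 		if ami[1] not in friends:
-- 			friends[ami[1]] = set()
-- 	return friends
-- ===== SOURCE B (Python) =====
-- def construction_dict_amis(amis):
--     # Different decomposition: first list every person in first-appearance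
--     # order (all senders in pair order, then receive-only persons), then
--     # compute each person's friend set by its own scan over the pairs.
--     persons = list(dict.fromkeys([a for a, _ in amis] + [b for _, b in amis]))
--     return {p: {b for a, b in amis if a == p} for p in persons}
-- ===== Notes on version B (the rewrite author's own statement) =====
-- stated objective: alternative
-- what changed: B never builds the dict incrementally: it first derives the ordered person list via dict.fromkeys over both columns, then computes each person's friend set with a dedicated per-person scan (a grouping comprehension), instead of A's create-on-demand mutation loop plus a trailing cleanup pass.
import Mathlib
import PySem

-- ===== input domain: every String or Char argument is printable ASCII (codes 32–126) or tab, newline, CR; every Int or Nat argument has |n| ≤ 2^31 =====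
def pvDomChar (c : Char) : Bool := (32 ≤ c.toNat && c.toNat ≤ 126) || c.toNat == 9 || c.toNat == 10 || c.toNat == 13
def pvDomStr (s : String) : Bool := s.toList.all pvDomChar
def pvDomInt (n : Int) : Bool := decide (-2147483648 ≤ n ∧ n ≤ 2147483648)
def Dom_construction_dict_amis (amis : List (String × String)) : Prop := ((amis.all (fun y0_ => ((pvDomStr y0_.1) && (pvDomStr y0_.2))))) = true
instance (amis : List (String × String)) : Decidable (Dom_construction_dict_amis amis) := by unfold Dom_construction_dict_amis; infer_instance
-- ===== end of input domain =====

-- B lists every person up front (dict.fromkeys over both columns) and then computes each person's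
-- friend set by its own per-person scan, instead of A's create-on-demand mutation loops;
-- objective: alternative decomposition. Return-value equivalence only (both build a fresh dict).

-- ===== PORT A =====
-- body of A's first loop: create-on-demand, then the (always taken) second 'if' adds again
def aStep (d : PySem.Dict String (PySem.Set String)) (ami : String × String) :
    PySem.Dict String (PySem.Set String) :=
  let d1 := if d.contains ami.1 = false then
      (d.insert ami.1 PySem.Set.empty).modify ami.1 PySem.Set.empty (fun s => PySem.Set.add s ami.2)
    else d
  if d1.contains ami.1 = true then
    d1.modify ami.1 PySem.Set.empty (fun s => PySem.Set.add s ami.2)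
  else d1

-- body of A's second loop: register receive-only persons
def aStep2 (d : PySem.Dict String (PySem.Set String)) (ami : String × String) :
    PySem.Dict String (PySem.Set String) :=
  if d.contains ami.2 = false then d.insert ami.2 PySem.Set.empty else d

def construction_dict_amis (amis : List (String × String)) : List (String × List String) :=
  (amis.foldl aStep2 (amis.foldl aStep PySem.Dict.empty)).items

-- ===== PORT B =====
-- {b for a, b in amis if a == p}
def bFriends (amis : List (String × String)) (p : String) : PySem.Set String :=
  amis.foldl (fun s q => if q.1 == p then PySem.Set.add s q.2 else s) PySem.Set.empty

def construction_dict_amis_alt (amis : List (String × String)) : List (String × List String) :=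
  -- persons = list(dict.fromkeys([a for a,_ in amis] + [b for _,b in amis]))
  let persons := PySem.List.dedup (amis.map (fun q => q.1) ++ amis.map (fun q => q.2))
  -- {p: {b for a, b in amis if a == p} for p in persons}
  (persons.foldl (fun d p => d.insert p (bFriends amis p)) PySem.Dict.empty).items

-- ===== PRECONDITION & SPEC =====
def Spec_construction_dict_amis (amis : List (String × String)) (out : List (String × List String)) : Prop := out = construction_dict_amis_alt amis
instance (amis : List (String × String)) (out : List (String × List String)) : Decidable (Spec_construction_dict_amis amis out) := by unfold Spec_construction_dict_amis; infer_instance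

-- ===== CLAIM (what is proved, stated in full; the proofs are below) =====
def Claim_equal_construction_dict_amis : Prop := ∀ (amis : List (String × String)), Dom_construction_dict_amis amis → Spec_construction_dict_amis amis (construction_dict_amis amis)

-- ===== LEMMAS AND PROOFS =====

-- proof-side abbreviations
def sdStep (key : String × String → String) (d : PySem.Dict String (PySem.Set String))
    (p : String × String) : PySem.Dict String (PySem.Set String) :=
  d.setdefault (key p) PySem.Set.empty

def bFill (d : PySem.Dict String (PySem.Set String)) (p : String × String) :
    PySem.Dict String (PySem.Set String) :=
  d.modify p.1 PySem.Set.empty (fun s => PySem.Set.add s p.2)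

-- "union into s of all seconds whose first is k"
def gAll (l : List (String × String)) (k : String) (s : PySem.Set String) : PySem.Set String :=
  l.foldl (fun s q => if q.1 == k then PySem.Set.add s q.2 else s) s

theorem set_add_add (s : PySem.Set String) (x : String) :
    PySem.Set.add (PySem.Set.add s x) x = PySem.Set.add s x := by
  by_cases h : x ∈ s
  · simp [PySem.Set.add, PySem.Set.contains, h]
  · simp [PySem.Set.add, PySem.Set.contains, h]

-- A's first-loop body is setdefault-then-add
theorem aStep_eq (d : PySem.Dict String (PySem.Set String)) (p : String × String) :
    aStep d p = (d.setdefault p.1 PySem.Set.empty).modify p.1 PySem.Set.empty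
      (fun s => PySem.Set.add s p.2) := by
  unfold aStep
  by_cases h : d.contains p.1
  · simp [h, PySem.Dict.setdefault_of_contains d _ h]
  · rw [eq_false_of_ne_true h]
    simp only [if_true,
      PySem.Dict.setdefault_of_not_contains d PySem.Set.empty (eq_false_of_ne_true h)]
    have hc : ((d.insert p.1 PySem.Set.empty).modify p.1 PySem.Set.empty
        (fun s => PySem.Set.add s p.2)).contains p.1 = true := by
      simp [PySem.Dict.contains_modify]
    simp only [hc, if_true]
    simp only [PySem.Dict.modify, PySem.Dict.getD_insert_self, PySem.Dict.insert_insert_self]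
    rw [set_add_add]

-- A's second-loop body is setdefault
theorem aStep2_eq (d : PySem.Dict String (PySem.Set String)) (p : String × String) :
    aStep2 d p = sdStep (fun p => p.2) d p := by
  unfold aStep2 sdStep
  by_cases h : d.contains p.2
  · simp [h, PySem.Dict.setdefault_of_contains d _ h]
  · rw [eq_false_of_ne_true h]
    simp [PySem.Dict.setdefault_of_not_contains d _ (eq_false_of_ne_true h)]

-- one setdefault step commutes past a modify at an already-present key
theorem sd_modify_step (d : PySem.Dict String (PySem.Set String)) (a b : String)
    (f : PySem.Set String → PySem.Set String) (h : d.contains a = true) :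
    (d.modify a PySem.Set.empty f).setdefault b PySem.Set.empty
      = (d.setdefault b PySem.Set.empty).modify a PySem.Set.empty f := by
  by_cases hb : d.contains b
  · have h1 : (d.modify a PySem.Set.empty f).contains b = true := by
      simp [PySem.Dict.contains_modify, hb]
    rw [PySem.Dict.setdefault_of_contains _ _ h1, PySem.Dict.setdefault_of_contains _ _ hb]
  · have hba : b ≠ a := by intro e; exact hb (e ▸ h)
    have h1 : (d.modify a PySem.Set.empty f).contains b = false := by
      simp [PySem.Dict.contains_modify, eq_false_of_ne_true hb, hba]
    have h2 : (d.setdefault b PySem.Set.empty).contains a = true := by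
      simp [PySem.Dict.contains_setdefault, h]
    apply PySem.Dict.ext
    rw [PySem.Dict.setdefault_of_not_contains _ _ h1,
        PySem.Dict.setdefault_of_not_contains _ _ (eq_false_of_ne_true hb)]
    have hga : (d.insert b PySem.Set.empty).getD a PySem.Set.empty = d.getD a PySem.Set.empty := by
      rw [PySem.Dict.getD_eq_get?_getD, PySem.Dict.getD_eq_get?_getD,
          PySem.Dict.get?_insert_of_ne d _ (Ne.symm hba)]
    have hma : (d.insert b PySem.Set.empty).contains a = true := by
      simp [PySem.Dict.contains_insert, h]
    simp only [PySem.Dict.modify, hga]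
    rw [PySem.Dict.items_insert, PySem.Dict.items_insert ((d.insert b PySem.Set.empty)),
        PySem.Dict.items_insert, PySem.Dict.items_insert]
    simp only [h, hma, if_true]
    have hcont : d.contains b = false := eq_false_of_ne_true hb
    have hc2 : (d.insert a (f (d.getD a PySem.Set.empty))).contains b = false := by
      simp [PySem.Dict.contains_insert, hcont, hba]
    simp only [hc2, Bool.false_eq_true, if_false]
    simp [hcont, List.map_append, hba]

-- a whole setdefault pass commutes past a modify at an already-present key
theorem sd_pass_modify (key : String × String → String) (l : List (String × String))
    (d : PySem.Dict String (PySem.Set String)) (a : String)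
    (f : PySem.Set String → PySem.Set String) (h : d.contains a = true) :
    l.foldl (sdStep key) (d.modify a PySem.Set.empty f)
      = (l.foldl (sdStep key) d).modify a PySem.Set.empty f := by
  induction l generalizing d with
  | nil => rfl
  | cons p l ih =>
    simp only [List.foldl_cons]
    rw [show sdStep key (d.modify a PySem.Set.empty f) p
          = (sdStep key d p).modify a PySem.Set.empty f from sd_modify_step d a (key p) f h]
    exact ih (sdStep key d p) (by simp [sdStep, PySem.Dict.contains_setdefault, h])

-- interleaved setdefault+modify pass = setdefault pass then modify pass
theorem interleave (l : List (String × String)) (d : PySem.Dict String (PySem.Set String)) :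
    l.foldl (fun d p => (d.setdefault p.1 PySem.Set.empty).modify p.1 PySem.Set.empty
      (fun s => PySem.Set.add s p.2)) d
      = l.foldl bFill (l.foldl (sdStep (fun p => p.1)) d) := by
  induction l generalizing d with
  | nil => rfl
  | cons p l ih =>
    simp only [List.foldl_cons]
    rw [ih]
    congr 1
    rw [sd_pass_modify (fun p => p.1) l (d.setdefault p.1 PySem.Set.empty) p.1 _
      (by simp [PySem.Dict.contains_setdefault])]
    rfl

-- the fill pass commutes past the receiver setdefault pass when all senders are present
theorem fill_sd_swap (l l2 : List (String × String)) (d : PySem.Dict String (PySem.Set String))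
    (h : ∀ p ∈ l, d.contains p.1 = true) :
    l.foldl bFill (l2.foldl (sdStep (fun p => p.2)) d)
      = l2.foldl (sdStep (fun p => p.2)) (l.foldl bFill d) := by
  induction l generalizing d with
  | nil => rfl
  | cons p l ih =>
    simp only [List.foldl_cons]
    rw [show bFill (l2.foldl (sdStep (fun p => p.2)) d) p
          = l2.foldl (sdStep (fun p => p.2)) (bFill d p) from
        (sd_pass_modify (fun p => p.2) l2 d p.1 _ (h p (by simp))).symm]
    exact ih (bFill d p) (fun q hq => by
      simp [bFill, PySem.Dict.contains_modify, h q (List.mem_cons_of_mem p hq)])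

-- a setdefault pass keeps keys present
theorem contains_mono_sd (key : String × String → String) (l : List (String × String))
    (d : PySem.Dict String (PySem.Set String)) (k : String) (h : d.contains k = true) :
    (l.foldl (sdStep key) d).contains k = true := by
  induction l generalizing d with
  | nil => exact h
  | cons p l ih =>
    exact ih (sdStep key d p) (by simp [sdStep, PySem.Dict.contains_setdefault, h])

theorem contains_sd_pass (l : List (String × String)) :
    ∀ (d : PySem.Dict String (PySem.Set String)) (p : String × String), p ∈ l →
      (l.foldl (sdStep (fun p => p.1)) d).contains p.1 = true := by
  induction l with
  | nil => intro d p hp; cases hp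
  | cons q l ih =>
    intro d p hp
    simp only [List.foldl_cons]
    rcases List.mem_cons.mp hp with rfl | hl
    · exact contains_mono_sd _ l _ _ (by simp [sdStep, PySem.Dict.contains_setdefault])
    · exact ih _ p hl

theorem foldl_ext {α β : Type} (f g : β → α → β) (h : ∀ d x, f d x = g d x)
    (l : List α) : ∀ (d : β), l.foldl f d = l.foldl g d := by
  induction l with
  | nil => intro d; rfl
  | cons x l ih => intro d; simp only [List.foldl_cons, h]; exact ih _

-- a setdefault pass on an all-empty dict extends the key list like Set.update
theorem sd_items (key : String × String → String) (l : List (String × String)) :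
    ∀ (d : PySem.Dict String (PySem.Set String)) (ks : PySem.Set String),
      d.items = ks.map (fun k => (k, (PySem.Set.empty : PySem.Set String))) →
      (l.foldl (sdStep key) d).items
        = (PySem.Set.update ks (l.map key)).map (fun k => (k, PySem.Set.empty)) := by
  induction l with
  | nil => intro d ks h; simpa [PySem.Set.update] using h
  | cons p l ih =>
    intro d ks h
    have hkeys : d.keys = ks := by
      simp [PySem.Dict.keys, h, List.map_map, Function.comp_def]
    simp only [List.foldl_cons, List.map_cons, PySem.Set.update_cons]
    by_cases hm : key p ∈ ks
    · have hc : d.contains (key p) = true := by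
        rw [PySem.Dict.contains_iff_mem_keys]; rw [hkeys]; exact hm
      rw [show sdStep key d p = d from by
        simp [sdStep, PySem.Dict.setdefault_of_contains d _ hc]]
      rw [PySem.Set.add_of_mem hm]
      exact ih d ks h
    · have hc : d.contains (key p) = false := by
        cases hcc : d.contains (key p) with
        | false => rfl
        | true => exact absurd (hkeys ▸ (PySem.Dict.contains_iff_mem_keys _ _).mp hcc) hm
      rw [show sdStep key d p = d.insert (key p) PySem.Set.empty from by
        simp [sdStep, PySem.Dict.setdefault_of_not_contains d _ hc]]
      apply ih
      rw [PySem.Dict.items_insert_of_not_contains _ _ hc, h, PySem.Set.add_of_not_mem hm]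
      simp

-- the fill pass rewrites every stored value by gAll, keys untouched
theorem fill_items (l : List (String × String)) :
    ∀ (d : PySem.Dict String (PySem.Set String)), d.keys.Nodup →
      (∀ p ∈ l, d.contains p.1 = true) →
      (l.foldl bFill d).items = d.items.map (fun kv => (kv.1, gAll l kv.1 kv.2)) := by
  induction l with
  | nil =>
    intro d _ _
    simp [gAll]
  | cons p l ih =>
    intro d hnd h
    have hc : d.contains p.1 = true := h p (by simp)
    have hone : (bFill d p).items
        = d.items.map (fun q => (q.1, if q.1 == p.1 then PySem.Set.add q.2 p.2 else q.2)) := by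
      have hhc : d.contains p.1 = true := hc
      simp only [bFill, PySem.Dict.modify]
      rw [PySem.Dict.items_insert_of_contains _ _ (by simpa [PySem.Dict.modify] using hhc)]
      apply List.map_congr_left
      intro q hq
      by_cases he : q.1 = p.1
      · obtain ⟨q1, q2⟩ := q
        simp only at he
        subst he
        have hv : d.getD p.1 PySem.Set.empty = q2 :=
          PySem.Dict.getD_of_mem_items d hq hnd _
        have hv' : d.getD p.1 ([] : List String) = q2 := hv
        simp [hv']
      · simp [he]
    have hnd' : (bFill d p).keys.Nodup := by
      have hk : (bFill d p).keys = d.keys := by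
        simp only [bFill, PySem.Dict.keys_modify]
        exact PySem.Dict.keys_insert_of_contains _ _ (by simpa [PySem.Dict.modify] using hc)
      rw [hk]; exact hnd
    have hctn : ∀ q ∈ l, (bFill d p).contains q.1 = true := fun q hq => by
      simp [bFill, PySem.Dict.contains_modify, h q (List.mem_cons_of_mem p hq)]
    simp only [List.foldl_cons]
    rw [ih (bFill d p) hnd' hctn, hone, List.map_map]
    apply List.map_congr_left
    intro q _
    simp only [Function.comp]
    have : gAll (p :: l) q.1 q.2
        = gAll l q.1 (if p.1 == q.1 then PySem.Set.add q.2 p.2 else q.2) := rfl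
    rw [this]
    by_cases he : q.1 = p.1
    · simp [he]
    · simp [he, Ne.symm he]

-- ===== VERDICT (by name: the statement is the Claim_ definition above) =====
theorem construction_dict_amis_spec : Claim_equal_construction_dict_amis := by
  intro amis _
  unfold Spec_construction_dict_amis construction_dict_amis construction_dict_amis_alt
  -- the ordered person list
  set personsL : PySem.Set String :=
    PySem.Set.update (PySem.Set.update PySem.Set.empty (amis.map (fun q => q.1)))
      (amis.map (fun q => q.2)) with hpersons
  have hdedup : PySem.List.dedup (amis.map (fun q => q.1) ++ amis.map (fun q => q.2))
      = personsL := by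
    rw [show PySem.List.dedup (amis.map (fun q => q.1) ++ amis.map (fun q => q.2))
          = PySem.Set.ofList (amis.map (fun q => q.1) ++ amis.map (fun q => q.2)) from rfl,
        PySem.Set.ofList_append]
    rfl
  -- A's dict, normalised: setdefault passes then the fill pass
  have hA1 : amis.foldl aStep PySem.Dict.empty
      = amis.foldl bFill (amis.foldl (sdStep (fun p => p.1)) PySem.Dict.empty) := by
    rw [foldl_ext aStep _ aStep_eq amis PySem.Dict.empty]
    exact interleave amis PySem.Dict.empty
  have hA : amis.foldl aStep2 (amis.foldl aStep PySem.Dict.empty)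
      = amis.foldl bFill
          (amis.foldl (sdStep (fun p => p.2))
            (amis.foldl (sdStep (fun p => p.1)) PySem.Dict.empty)) := by
    rw [foldl_ext aStep2 _ aStep2_eq amis, hA1,
        fill_sd_swap amis amis _ (fun p hp => contains_sd_pass amis _ p hp)]
  -- the two setdefault passes produce exactly the person list with empty values
  have hsd : (amis.foldl (sdStep (fun p => p.2))
        (amis.foldl (sdStep (fun p => p.1)) PySem.Dict.empty)).items
      = personsL.map (fun k => (k, PySem.Set.empty)) := by
    rw [sd_items (fun p => p.2) amis _
      (PySem.Set.update PySem.Set.empty (amis.map (fun q => q.1)))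
      (sd_items (fun p => p.1) amis PySem.Dict.empty PySem.Set.empty (by rfl))]
  set D := amis.foldl (sdStep (fun p => p.2))
      (amis.foldl (sdStep (fun p => p.1)) PySem.Dict.empty) with hD
  have hndP : personsL.Nodup :=
    PySem.Set.nodup_update _ _ (PySem.Set.nodup_update _ _ List.nodup_nil)
  have hkeysD : D.keys = personsL := by
    simp [PySem.Dict.keys, hsd, List.map_map, Function.comp_def]
  have hndD : D.keys.Nodup := by rw [hkeysD]; exact hndP
  have hcD : ∀ p ∈ amis, D.contains p.1 = true := by
    intro p hp
    rw [PySem.Dict.contains_iff_mem_keys, hkeysD, hpersons]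
    rw [PySem.Set.mem_update]
    left
    rw [PySem.Set.mem_update]
    right
    exact List.mem_map_of_mem hp
  -- A's items
  have hAitems : (amis.foldl aStep2 (amis.foldl aStep PySem.Dict.empty)).items
      = personsL.map (fun k => (k, gAll amis k PySem.Set.empty)) := by
    rw [hA, fill_items amis D hndD hcD, hsd, List.map_map]
    simp [Function.comp_def]
  -- B's items
  have hBitems : ((PySem.List.dedup (amis.map (fun q => q.1) ++ amis.map (fun q => q.2))).foldl
        (fun d p => d.insert p (bFriends amis p)) PySem.Dict.empty).items
      = personsL.map (fun k => (k, gAll amis k PySem.Set.empty)) := by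
    rw [hdedup,
        PySem.Dict.items_foldl_insert_fresh personsL (fun p => p) (bFriends amis)
          PySem.Dict.empty (fun a _ => PySem.Dict.contains_empty a)
          (by simpa using hndP)]
    rfl
  rw [hAitems, hBitems]
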